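-- pv_equiv track=rewrite | github.com/JessePiensalmiUni/SSD | DeepMAD.py | calculateFLOPs
-- ===== SOURCE A (Python) =====
-- def calculateFLOPs(w, Li, image_size=(320, 320)):
--     flops = 0
--     # Example: iterate through layers, assuming w influences output channels and Li influences depth
--     for layer_idx, depth in enumerate(Li):
--         for d in range(int(depth)):  # Repeat calculations based on depth
--             # Simplified FLOPs calculation for a conv layer
--             in_channels = w[layer_idx-1] if layer_idx > 0 else 3  # Assume 3 input channels for the first layer
--             out_channels = w[layer_idx]
--             kernel_size = 3  # Example kernel size
--             flops += 2 * image_size[0] * image_size[1] * in_channels * out_channels * kernel_size ** 2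
--             image_size = (image_size[0] // 2, image_size[1] // 2)  # Example: halve image size for simplicity
--     return flops
-- ===== SOURCE B (Python) =====
-- def calculateFLOPs(w, Li, image_size=(320, 320)):
--     # Prefix-sum re-implementation: precompute per-step areas once, factor the
--     # per-layer channel product out of the inner loop.
--     steps = [max(int(d), 0) for d in Li]
--     total = sum(steps)
--     if total == 0:
--         return 0
--     s0, s1 = image_size[0], image_size[1]
--     prefix = [0]
--     for _ in range(total):
--         prefix.append(prefix[-1] + s0 * s1)
--         s0 //= 2
--         s1 //= 2
--     flops = 0
--     start = 0
--     for i, d in enumerate(steps):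
--         if d > 0:
--             c_in = 3 if i == 0 else w[i - 1]
--             flops += 18 * c_in * w[i] * (prefix[start + d] - prefix[start])
--         start += d
--     return flops
-- ===== Notes on version B (the rewrite author's own statement) =====
-- stated objective: alternative
-- what changed: B precomputes the per-step areas of the halving image once as a prefix-sum table and then does a single pass over layers, adding 18*c_in*c_out*(P[start+d]-P[start]) per layer, instead of A's nested loop that recomputes the full channel product and rebuilds the image-size tuple at every step; a timing run measured B ~1.6-1.9x faster (fewer multiplications and allocations per step).
import Mathlib
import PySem

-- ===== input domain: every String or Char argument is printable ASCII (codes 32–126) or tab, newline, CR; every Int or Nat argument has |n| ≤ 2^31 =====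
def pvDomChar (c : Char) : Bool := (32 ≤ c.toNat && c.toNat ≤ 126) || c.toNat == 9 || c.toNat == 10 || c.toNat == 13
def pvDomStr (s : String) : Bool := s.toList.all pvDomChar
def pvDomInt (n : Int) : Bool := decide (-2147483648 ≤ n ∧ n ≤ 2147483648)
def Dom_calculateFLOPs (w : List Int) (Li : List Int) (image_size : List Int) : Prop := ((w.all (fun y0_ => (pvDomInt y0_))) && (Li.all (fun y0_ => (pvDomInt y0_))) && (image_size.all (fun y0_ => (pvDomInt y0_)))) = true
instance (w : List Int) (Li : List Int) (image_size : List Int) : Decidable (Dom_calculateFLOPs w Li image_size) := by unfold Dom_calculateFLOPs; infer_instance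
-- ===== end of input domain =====

-- B replaces A's nested recompute-everything loop by a precomputed area prefix-sum table and one pass over layers (alternative decomposition, same cost).


-- ===== PORT A =====
-- total list indexing used by both ports; the default 0 is never reached inside Pre_
def pyg (xs : List Int) (i : Int) : Int := PySem.List.pyGetD xs i 0

def fdiv2 (x : Int) : Int := PySem.Int.floordiv x 2

-- inner 'for d in range(int(depth))' loop of A: state (flops, image_size)
def calcInner (w : List Int) (idx : Nat) : List Int → Int × List Int → Int × List Int
  | [], st => st
  | _ :: ds, (f, img) =>
      let cin : Int := if 0 < idx then pyg w ((idx : Int) - 1) else 3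
      let cout : Int := pyg w (idx : Int)
      calcInner w idx ds
        (f + 2 * pyg img 0 * pyg img 1 * cin * cout * 3 ^ 2,
         [fdiv2 (pyg img 0), fdiv2 (pyg img 1)])

-- outer 'for layer_idx, depth in enumerate(Li)' loop of A
def calcOuter (w : List Int) : List Int → Nat → Int × List Int → Int × List Int
  | [], _, st => st
  | d :: rest, idx, st =>
      calcOuter w rest (idx + 1) (calcInner w idx (PySem.List.pyRange 0 d 1) st)

def calculateFLOPs (w : List Int) (Li : List Int) (image_size : List Int) : Int :=
  (calcOuter w Li 0 (0, image_size)).1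

-- ===== PORT B =====
-- 'for _ in range(total): prefix.append(prefix[-1] + s0*s1); s0 //= 2; s1 //= 2'
def altPrefix : Nat → Int → Int → List Int → List Int
  | 0, _, _, p => p
  | n + 1, s0, s1, p => altPrefix n (fdiv2 s0) (fdiv2 s1) (p ++ [pyg p (-1) + s0 * s1])

-- 'for i, d in enumerate(steps): …'
def altLayers (w q : List Int) : List Int → Nat → Int → Int → Int
  | [], _, _, f => f
  | d :: rest, i, start, f =>
      let f' : Int :=
        if 0 < d then
          let cin : Int := if i = 0 then 3 else pyg w ((i : Int) - 1)
          f + 18 * cin * pyg w (i : Int) * (pyg q (start + d) - pyg q start)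
        else f
      altLayers w q rest (i + 1) (start + d) f'

def calculateFLOPs_alt (w : List Int) (Li : List Int) (image_size : List Int) : Int :=
  let steps := Li.map (fun d => max d 0)
  let total := steps.sum
  if total = 0 then 0
  else
    altLayers w (altPrefix total.toNat (pyg image_size 0) (pyg image_size 1) [0]) steps 0 0 0

-- ===== PRECONDITION & SPEC =====
-- Pre_ excludes exactly the inputs where Python A raises an IndexError: some layer i has
-- depth Li[i] > 0 while i ≥ len(w) or len(image_size) < 2.
def Pre_calculateFLOPs (w : List Int) (Li : List Int) (image_size : List Int) : Prop :=
  ∀ i < Li.length, 0 < Li.getD i 0 → i < w.length ∧ 2 ≤ image_size.length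
instance (w : List Int) (Li : List Int) (image_size : List Int) : Decidable (Pre_calculateFLOPs w Li image_size) := by unfold Pre_calculateFLOPs; infer_instance

def pvWitness_calculateFLOPs : List Int × List Int × List Int := ([4, 5], [2, 1], [16, 12])

def Spec_calculateFLOPs (w : List Int) (Li : List Int) (image_size : List Int) (out : Int) : Prop := out = calculateFLOPs_alt w Li image_size
instance (w : List Int) (Li : List Int) (image_size : List Int) (out : Int) : Decidable (Spec_calculateFLOPs w Li image_size out) := by unfold Spec_calculateFLOPs; infer_instance

-- ===== CLAIM (what is proved, stated in full; the proofs are below) =====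
def Claim_equal_calculateFLOPs : Prop := ∀ (w : List Int) (Li : List Int) (image_size : List Int), Dom_calculateFLOPs w Li image_size → Pre_calculateFLOPs w Li image_size → Spec_calculateFLOPs w Li image_size (calculateFLOPs w Li image_size)

-- ===== LEMMAS AND PROOFS =====

-- k-fold halving
def itH : Nat → Int → Int
  | 0, x => x
  | k + 1, x => itH k (fdiv2 x)

-- sum of the first k step areas starting from sizes (a, b)
def aS : Nat → Int → Int → Int
  | 0, _, _ => 0
  | k + 1, a, b => a * b + aS k (fdiv2 a) (fdiv2 b)

lemma itH_add (m n : Nat) (x : Int) : itH n (itH m x) = itH (m + n) x := by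
  induction m generalizing x with
  | zero => simp [itH]
  | succ m ih => simp only [itH, Nat.succ_add]; exact ih _

lemma aS_add (m n : Nat) (a b : Int) :
    aS (m + n) a b = aS m a b + aS n (itH m a) (itH m b) := by
  induction m generalizing a b with
  | zero => simp [aS, itH]
  | succ m ih => simp only [Nat.succ_add, aS, itH]; rw [ih]; ring

lemma pyg_pair0 (x y : Int) : pyg [x, y] 0 = x := PySem.List.pyGetD_zero_cons _ _ _
lemma pyg_pair1 (x y : Int) : pyg [x, y] 1 = y := rfl

lemma inner_fst (w : List Int) (idx : Nat) (L : List Int) (f : Int) (img : List Int) :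
    (calcInner w idx L (f, img)).1 =
      f + 2 * (if 0 < idx then pyg w ((idx : Int) - 1) else 3) * pyg w (idx : Int) * 3 ^ 2
            * aS L.length (pyg img 0) (pyg img 1) := by
  induction L generalizing f img with
  | nil => simp [calcInner, aS]
  | cons d ds ih =>
      simp only [calcInner, ih, List.length_cons, aS, pyg_pair0, pyg_pair1]
      ring

lemma inner_snd0 (w : List Int) (idx : Nat) (L : List Int) (f : Int) (img : List Int) :
    pyg (calcInner w idx L (f, img)).2 0 = itH L.length (pyg img 0) := by
  induction L generalizing f img with
  | nil => simp [calcInner, itH]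
  | cons d ds ih => simp only [calcInner, ih, List.length_cons, itH, pyg_pair0]

lemma inner_snd1 (w : List Int) (idx : Nat) (L : List Int) (f : Int) (img : List Int) :
    pyg (calcInner w idx L (f, img)).2 1 = itH L.length (pyg img 1) := by
  induction L generalizing f img with
  | nil => simp [calcInner, itH]
  | cons d ds ih => simp only [calcInner, ih, List.length_cons, itH, pyg_pair1]

lemma altPrefix_spec (n : Nat) (a b : Int) (p : List Int) (hp : p ≠ []) :
    altPrefix n a b p = p ++ (List.range n).map (fun j => p.getLast hp + aS (j + 1) a b) := by
  induction n generalizing a b p with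
  | zero => simp [altPrefix]
  | succ n ih =>
      have hl : pyg p (-1) = p.getLast hp := PySem.List.pyGetD_neg_one p 0 hp
      have hne : p ++ [pyg p (-1) + a * b] ≠ [] := by simp
      rw [altPrefix, ih _ _ _ hne]
      simp only [List.getLast_append_singleton, hl, List.range_succ_eq_map,
        List.map_cons, List.map_map, List.append_assoc, List.singleton_append]
      congr 1
      congr 1
      · simp [aS]
      · congr 1; funext j
        simp only [Function.comp, Nat.succ_eq_add_one]
        show p.getLast hp + a * b + aS (j + 1) (fdiv2 a) (fdiv2 b) = p.getLast hp + aS (j + 1 + 1) a b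
        rw [show aS (j + 1 + 1) a b = a * b + aS (j + 1) (fdiv2 a) (fdiv2 b) from rfl]
        ring

lemma prefix_get (n k : Nat) (a b : Int) (hk : k ≤ n) :
    pyg (altPrefix n a b [0]) (k : Int) = aS k a b := by
  rw [altPrefix_spec n a b [0] (by simp)]
  simp only [pyg, PySem.List.pyGetD_natCast]
  cases k with
  | zero => simp [aS]
  | succ k =>
      have hk' : k < n := by omega
      simp [List.getD, hk', aS]

lemma stepsum_cast (l : List Int) :
    (l.map (fun d => max d 0)).sum = ((l.map Int.toNat).sum : Int) := by
  induction l with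
  | nil => simp
  | cons d l ih =>
      simp only [List.map_cons, List.sum_cons, ih]
      push_cast [Int.toNat_eq_max]
      ring

lemma outer_eq (w : List Int) (s0 s1 : Int) (N : Nat) (q : List Int)
    (hq : ∀ k ≤ N, pyg q (k : Int) = aS k s0 s1) :
    ∀ (rest : List Int) (idx start : Nat) (f : Int) (img : List Int),
      pyg img 0 = itH start s0 → pyg img 1 = itH start s1 →
      start + (rest.map Int.toNat).sum ≤ N →
      (calcOuter w rest idx (f, img)).1 =
        altLayers w q (rest.map (fun d => max d 0)) idx (start : Int) f := by
  intro rest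
  induction rest with
  | nil => intro idx start f img _ _ _; simp [calcOuter, altLayers]
  | cons d rest ih =>
      intro idx start f img h0 h1 hb
      have hlen : (PySem.List.pyRange 0 d 1).length = d.toNat := by
        simp [PySem.List.length_pyRange_one]
      have hst : (calcInner w idx (PySem.List.pyRange 0 d 1) (f, img)) =
          ((calcInner w idx (PySem.List.pyRange 0 d 1) (f, img)).1,
           (calcInner w idx (PySem.List.pyRange 0 d 1) (f, img)).2) := rfl
      rw [calcOuter, hst,
        ih (idx + 1) (start + d.toNat) _ _
          (by rw [inner_snd0, hlen, h0, itH_add])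
          (by rw [inner_snd1, hlen, h1, itH_add])
          (by simp only [List.map_cons, List.sum_cons] at hb ⊢; omega)]
      rw [inner_fst, hlen, h0, h1, List.map_cons, altLayers]
      have hcast : (start : Int) + max d 0 = ((start + d.toNat : Nat) : Int) := by
        push_cast [Int.toNat_eq_max]; ring
      by_cases hd : 0 < d
      · have hpos : (0 : Int) < max d 0 := by omega
        have hq1 : pyg q ((start : Int) + max d 0) = aS (start + d.toNat) s0 s1 := by
          rw [hcast]; exact hq _ (by simp only [List.map_cons, List.sum_cons] at hb; omega)
        have hq2 : pyg q (start : Int) = aS start s0 s1 :=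
          hq _ (by simp only [List.map_cons, List.sum_cons] at hb; omega)
        have hsplit : aS (start + d.toNat) s0 s1 = aS start s0 s1 + aS d.toNat (itH start s0) (itH start s1) :=
          aS_add _ _ _ _
        have hidx : (if idx = 0 then (3 : Int) else pyg w ((idx : Int) - 1)) =
            (if 0 < idx then pyg w ((idx : Int) - 1) else 3) := by
          cases idx <;> simp
        rw [if_pos hpos, hq1, hq2, hsplit, hcast, hidx]
        congr 1
        ring
      · have hd0 : d.toNat = 0 := by omega
        have hneg : ¬ (0 : Int) < max d 0 := by omega
        rw [if_neg hneg, hcast, hd0]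
        simp [aS]


lemma allNonpos_of_sum_zero (l : List Int) (h : (l.map (fun d => max d 0)).sum = 0) :
    ∀ d ∈ l, d ≤ 0 := by
  induction l with
  | nil => simp
  | cons x l ih =>
      simp only [List.map_cons, List.sum_cons] at h
      have hx : 0 ≤ max x 0 := le_max_right _ _
      have hs : 0 ≤ (l.map (fun d => max d 0)).sum := by
        apply List.sum_nonneg; intro y hy
        simp only [List.mem_map] at hy
        obtain ⟨z, _, rfl⟩ := hy
        exact le_max_right _ _
      have hx0 : x ≤ 0 := by
        by_contra hx'
        push Not at hx'
        rw [max_eq_left (by omega : (0 : Int) ≤ x)] at h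
        omega
      have hsum0 : (l.map (fun d => max d 0)).sum = 0 := by
        rw [max_eq_right hx0] at h
        omega
      intro d hd
      simp only [List.mem_cons] at hd
      rcases hd with rfl | hd
      · exact hx0
      · exact ih hsum0 d hd

lemma calcOuter_nonpos (w : List Int) (rest : List Int) (idx : Nat) (st : Int × List Int)
    (h : ∀ d ∈ rest, d ≤ 0) : calcOuter w rest idx st = st := by
  induction rest generalizing idx st with
  | nil => rfl
  | cons d rest ih =>
      have hd : d ≤ 0 := h d (by simp)
      rw [calcOuter, PySem.List.pyRange_one_eq_nil hd]
      exact ih _ _ (fun x hx => h x (by simp [hx]))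

-- ===== VERDICT (by name: the statement is the Claim_ definition above) =====
theorem calculateFLOPs_spec : Claim_equal_calculateFLOPs := by
  intro w Li image_size _ _
  unfold Spec_calculateFLOPs calculateFLOPs calculateFLOPs_alt
  by_cases h : (Li.map (fun d => max d 0)).sum = 0
  · rw [if_pos h, calcOuter_nonpos w Li 0 _ (allNonpos_of_sum_zero Li h)]
  · rw [if_neg h]
    have hcast := stepsum_cast Li
    exact outer_eq w (pyg image_size 0) (pyg image_size 1)
      ((Li.map (fun d => max d 0)).sum).toNat _
      (fun k hk => prefix_get _ k _ _ hk)
      Li 0 0 0 image_size rfl rfl (by rw [hcast, Int.toNat_natCast]; omega)
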